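-- pv_equiv track=rewrite | github.com/mimikrija/AdventOfCode2015 | 11.py | contains_two_pairs
-- ===== SOURCE A (Python) =====
-- def contains_two_pairs(password):
--     previous_match = ''
--     count = 0
--     for one, two in zip(password, password[1:]):
--         if one == two and one != previous_match:
--             previous_match = one
--             count += 1
--         if count == 2:
--             return True
--     return False
-- ===== SOURCE B (Python) =====
-- def contains_two_pairs(password):
--     doubled = {a for a, b in zip(password, password[1:]) if a == b}
--     return len(doubled) >= 2
-- ===== Notes on version B (the rewrite author's own statement) =====
-- stated objective: idiomatic
-- what changed: A's stateful single pass (previous_match + count with early exit) is replaced by collecting the set of doubled-pair letters with a set comprehension and returning whether it has at least two distinct elements.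
import Mathlib
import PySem

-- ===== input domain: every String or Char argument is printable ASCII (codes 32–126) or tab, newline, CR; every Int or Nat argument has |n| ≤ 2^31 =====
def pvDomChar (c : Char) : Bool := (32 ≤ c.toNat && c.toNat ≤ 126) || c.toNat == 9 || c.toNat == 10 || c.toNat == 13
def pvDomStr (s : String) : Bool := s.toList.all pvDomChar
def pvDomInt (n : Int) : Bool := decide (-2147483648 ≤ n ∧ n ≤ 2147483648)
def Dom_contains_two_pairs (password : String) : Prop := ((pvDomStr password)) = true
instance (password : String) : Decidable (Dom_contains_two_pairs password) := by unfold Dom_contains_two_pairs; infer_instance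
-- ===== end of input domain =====

-- B replaces A's stateful early-exit counter by collecting the set of doubled-pair
-- letters and testing that it has at least two distinct elements (idiomatic; same cost).

-- ===== PORT A =====
-- A's previous_match is '' or a 1-char string; '' never equals a 1-char string, so it is
-- ported exactly as Option Char (none = '').  password[1:] on a string = drop 1 of its chars.
def pvLoopA : List (Char × Char) → Option Char → Nat → Bool
  | [], _, _ => false
  | (one, two) :: rest, previous_match, count =>
    let st := if one == two && !(some one == previous_match)
              then (some one, count + 1) else (previous_match, count)
    if st.2 == 2 then true else pvLoopA rest st.1 st.2

def contains_two_pairs (password : String) : Bool :=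
  let l := password.toList
  pvLoopA (l.zip (l.drop 1)) none 0

-- ===== PORT B =====
def contains_two_pairs_alt (password : String) : Bool :=
  let l := password.toList
  let doubled : PySem.Set Char :=
    PySem.Set.ofList ((l.zip (l.drop 1)).filterMap
      (fun p => if p.1 == p.2 then some p.1 else none))
  decide (2 ≤ doubled.length)

-- ===== PRECONDITION & SPEC =====
def Spec_contains_two_pairs (password : String) (out : Bool) : Prop := out = contains_two_pairs_alt password
instance (password : String) (out : Bool) : Decidable (Spec_contains_two_pairs password out) := by unfold Spec_contains_two_pairs; infer_instance

-- ===== CLAIM (what is proved, stated in full; the proofs are below) =====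
def Claim_equal_contains_two_pairs : Prop := ∀ (password : String), Dom_contains_two_pairs password → Spec_contains_two_pairs password (contains_two_pairs password)

-- ===== LEMMAS AND PROOFS =====

-- the letters of the doubled adjacent pairs, in order
def pvDbl (ps : List (Char × Char)) : List Char :=
  ps.filterMap (fun p => if p.1 == p.2 then some p.1 else none)

theorem pvDbl_cons (a b : Char) (rest : List (Char × Char)) :
    pvDbl ((a, b) :: rest) = if a == b then a :: pvDbl rest else pvDbl rest := by
  simp only [pvDbl, List.filterMap_cons]
  split <;> simp_all

-- once one doubled letter c has been counted, A returns true iff a later doubled letter differs from c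
theorem pvLoopA_one (ps : List (Char × Char)) (c : Char) :
    pvLoopA ps (some c) 1 = (pvDbl ps).any (fun x => !(x == c)) := by
  induction ps with
  | nil => simp [pvLoopA, pvDbl]
  | cons p rest ih =>
    obtain ⟨a, b⟩ := p
    rw [pvDbl_cons]
    by_cases hab : a = b
    · subst hab
      by_cases hac : a = c
      · subst hac
        simp [pvLoopA, ih]
      · simp [pvLoopA, hac]
    · simp [pvLoopA, hab, ih]

-- A's full loop, characterised by the doubled-letter sequence
theorem pvLoopA_zero (ps : List (Char × Char)) :
    pvLoopA ps none 0 = match pvDbl ps with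
      | [] => false
      | c :: rest => rest.any (fun x => !(x == c)) := by
  induction ps with
  | nil => simp [pvLoopA, pvDbl]
  | cons p rest ih =>
    obtain ⟨a, b⟩ := p
    rw [pvDbl_cons]
    by_cases hab : a = b
    · subst hab
      simp [pvLoopA, pvLoopA_one]
    · simp [pvLoopA, hab, ih]

theorem pvNodup_two_le (s : List Char) (h : s.Nodup) :
    2 ≤ s.length ↔ ∃ x ∈ s, ∃ y ∈ s, x ≠ y := by
  match s with
  | [] => simp
  | [a] => simp
  | a :: b :: t =>
    simp only [List.length_cons]
    constructor
    · intro _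
      exact ⟨a, by simp, b, by simp, (List.nodup_cons.mp h).1 ∘ (fun e => e ▸ List.mem_cons_self)⟩
    · intro _; omega

-- B's set test, characterised by the same doubled-letter sequence
theorem pvSet_two_le (L : List Char) :
    decide (2 ≤ (PySem.Set.ofList L).length) = match L with
      | [] => false
      | c :: rest => rest.any (fun x => !(x == c)) := by
  match L with
  | [] => simp [PySem.Set.ofList]
  | c :: rest =>
    rw [Bool.eq_iff_iff]
    simp only [decide_eq_true_eq, List.any_eq_true, Bool.not_eq_eq_eq_not, Bool.not_true,
      beq_eq_false_iff_ne, ne_eq]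
    rw [pvNodup_two_le _ (PySem.Set.nodup_ofList _)]
    simp only [PySem.Set.mem_ofList]
    constructor
    · rintro ⟨x, hx, y, hy, hxy⟩
      rcases List.mem_cons.mp hx with rfl | hx
      · rcases List.mem_cons.mp hy with rfl | hy
        · exact absurd rfl hxy
        · exact ⟨y, hy, Ne.symm hxy⟩
      · by_cases hxc : x = c
        · subst hxc
          rcases List.mem_cons.mp hy with rfl | hy
          · exact absurd rfl hxy
          · exact ⟨y, hy, Ne.symm hxy⟩
        · exact ⟨x, hx, hxc⟩
    · rintro ⟨x, hx, hxc⟩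
      exact ⟨x, List.mem_cons_of_mem _ hx, c, List.mem_cons_self, hxc⟩

-- ===== VERDICT (by name: the statement is the Claim_ definition above) =====
theorem contains_two_pairs_spec : Claim_equal_contains_two_pairs := by
  intro password _
  show contains_two_pairs password = contains_two_pairs_alt password
  unfold contains_two_pairs contains_two_pairs_alt
  rw [pvLoopA_zero, pvSet_two_le]
  rfl
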